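-- pv_equiv track=rewrite | github.com/jenniferbe/advent_of_code | 2022/day_08/solution.py | is_visible_from_right
-- ===== SOURCE A (Python) =====
-- def is_visible_from_right(grid):
--     visible = set()
--     for y in range(len(grid)):
--         max_height = -1
--         for x in range(len(grid[0])-1, -1, -1):
--             height = grid[y][x]
--             if height > max_height:
--                 visible.add((x, y))
--                 max_height = height
--     return visible
-- ===== SOURCE B (Python) =====
-- def is_visible_from_right(grid):
--     visible = set()
--     for y in range(len(grid)):
--         w = len(grid[0])
--         row = grid[y]
--         for x in range(w - 1, -1, -1):
--             if row[x] > max(row[x + 1:w] + [-1]):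
--                 visible.add((x, y))
--     return visible
-- ===== Notes on version B (the rewrite author's own statement) =====
-- stated objective: alternative
-- what changed: Replaces the running-maximum accumulator with a stateless per-tree test: each tree is compared against the maximum of the slice to its right (with the -1 edge baseline), so no loop-carried max state is maintained.
import Mathlib
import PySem

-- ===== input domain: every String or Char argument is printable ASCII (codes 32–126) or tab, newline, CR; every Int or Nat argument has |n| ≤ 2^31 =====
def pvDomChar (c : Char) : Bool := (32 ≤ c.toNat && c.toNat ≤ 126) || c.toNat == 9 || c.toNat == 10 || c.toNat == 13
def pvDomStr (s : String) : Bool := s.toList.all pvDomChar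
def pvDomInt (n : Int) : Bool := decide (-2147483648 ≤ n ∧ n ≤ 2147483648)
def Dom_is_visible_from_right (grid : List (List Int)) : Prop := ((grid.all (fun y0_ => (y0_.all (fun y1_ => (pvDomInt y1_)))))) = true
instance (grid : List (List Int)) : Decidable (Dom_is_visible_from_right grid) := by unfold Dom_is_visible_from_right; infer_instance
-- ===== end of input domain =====

-- B replaces A's running-maximum state with a stateless per-tree comparison against the
-- maximum of the trees to its right (alternative decomposition, not faster).

-- ===== PORT A =====
-- A: for each row, scan x from right to left carrying max_height, add (x,y) when higher.
def is_visible_from_right (grid : List (List Int)) : List (Int × Int) :=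
  (PySem.List.pyRange 0 grid.length 1).foldl
    (fun visible y =>
      ((PySem.List.pyRange (((PySem.List.pyGetD grid 0 []).length : Int) - 1) (-1) (-1)).foldl
        (fun (st : List (Int × Int) × Int) x =>
          let height := PySem.List.pyGetD (PySem.List.pyGetD grid y []) x 0
          if height > st.2 then (PySem.Set.add st.1 (x, y), height) else st)
        (visible, -1)).1)
    []

-- ===== PORT B =====
-- B: for each row, add (x,y) iff row[x] > max(row[x+1:w] + [-1]); no carried state.
def is_visible_from_right_alt (grid : List (List Int)) : List (Int × Int) :=
  (PySem.List.pyRange 0 grid.length 1).foldl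
    (fun visible y =>
      let w : Int := ((PySem.List.pyGetD grid 0 []).length : Int)
      let row := PySem.List.pyGetD grid y []
      (PySem.List.pyRange (w - 1) (-1) (-1)).foldl
        (fun vis x =>
          if PySem.List.pyGetD row x 0 >
              ((PySem.List.max? (PySem.List.slice row (some (x + 1)) (some w) ++ [-1])
                  (fun v => v)).getD 0) then
            PySem.Set.add vis (x, y)
          else vis)
        visible)
    []

-- ===== PRECONDITION & SPEC =====
-- Pre_ excludes exactly the ragged grids on which A raises IndexError: a row shorter than
-- the first row (A indexes every row at positions up to len(grid[0])-1).
def Pre_is_visible_from_right (grid : List (List Int)) : Prop :=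
  ∀ row ∈ grid, (grid.headD []).length ≤ row.length
instance (grid : List (List Int)) : Decidable (Pre_is_visible_from_right grid) := by
  unfold Pre_is_visible_from_right; infer_instance
def pvWitness_is_visible_from_right : List (List Int) := [[3, 0, 3], [2, 5, 1]]

def Spec_is_visible_from_right (grid : List (List Int)) (out : List (Int × Int)) : Prop :=
  out = is_visible_from_right_alt grid
instance (grid : List (List Int)) (out : List (Int × Int)) :
    Decidable (Spec_is_visible_from_right grid out) := by
  unfold Spec_is_visible_from_right; infer_instance

-- ===== CLAIM (what is proved, stated in full; the proofs are below) =====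
def Claim_equal_is_visible_from_right : Prop :=
  ∀ (grid : List (List Int)), Dom_is_visible_from_right grid →
    Pre_is_visible_from_right grid →
    Spec_is_visible_from_right grid (is_visible_from_right grid)

-- ===== LEMMAS AND PROOFS =====

theorem foldl_max_swap (t : List Int) (a b : Int) :
    t.foldl max (max a b) = max a (t.foldl max b) := by
  induction t generalizing b with
  | nil => simp
  | cons c t ih => rw [List.foldl_cons, List.foldl_cons, max_assoc, ih]

theorem maxD_eq (l : List Int) :
    ((PySem.List.max? (l ++ [-1]) (fun v => v)).getD 0) = l.foldl max (-1) := by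
  cases l with
  | nil => rw [List.nil_append, PySem.List.max?_id_cons (-1 : Int) []]; simp
  | cons a t =>
      rw [List.cons_append, PySem.List.max?_id_cons a (t ++ [-1]), Option.getD_some,
        List.foldl_append, List.foldl_cons, List.foldl_nil, List.foldl_cons,
        foldl_max_swap]
      exact max_comm _ _

theorem slice_cons (row : List Int) (n : Nat) (w : Int) (hn : (n : Int) < w)
    (hw : w ≤ (row.length : Int)) :
    PySem.List.slice row (some (n : Int)) (some w) =
      row.getD n 0 :: PySem.List.slice row (some ((n : Int) + 1)) (some w) := by
  have h0w : (0 : Int) ≤ w := le_of_lt (lt_of_le_of_lt (Int.natCast_nonneg n) hn)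
  have hlen : n < row.length := by omega
  rw [PySem.List.slice_toNat _ (Int.natCast_nonneg n) h0w,
    PySem.List.slice_toNat _ (by omega) h0w]
  have h1 : ((n : Int) + 1).toNat = n + 1 := by omega
  have h2 : (n : Int).toNat = n := by omega
  rw [h1, h2]
  rw [List.drop_eq_getElem_cons hlen]
  have h3 : w.toNat - n = (w.toNat - (n + 1)) + 1 := by omega
  rw [h3, List.take_succ_cons, List.getD_eq_getElem _ _ hlen]

theorem rowEq (row : List Int) (w : Int) (y : Int) (hw : w ≤ (row.length : Int)) :
    ∀ (n : Nat), (n : Int) ≤ w → ∀ vis : List (Int × Int),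
    ((PySem.List.pyRange ((n : Int) - 1) (-1) (-1)).foldl
       (fun (st : List (Int × Int) × Int) x =>
          let height := PySem.List.pyGetD row x 0
          if height > st.2 then (PySem.Set.add st.1 (x, y), height) else st)
       (vis, (PySem.List.slice row (some (n : Int)) (some w)).foldl max (-1))).1
    = (PySem.List.pyRange ((n : Int) - 1) (-1) (-1)).foldl
       (fun vis x =>
          if PySem.List.pyGetD row x 0 >
              ((PySem.List.max? (PySem.List.slice row (some (x + 1)) (some w) ++ [-1])
                  (fun v => v)).getD 0) then
            PySem.Set.add vis (x, y)
          else vis) vis := by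
  intro n
  induction n with
  | zero =>
      intro _ vis
      rw [PySem.List.pyRange_neg_one_eq_nil (by norm_num)]
      rfl
  | succ n ih =>
      intro hle vis
      have hnw : (n : Int) < w := by push_cast at hle; omega
      have hx : ((n + 1 : Nat) : Int) - 1 = (n : Int) := by push_cast; ring
      have hcast : ((n + 1 : Nat) : Int) = (n : Int) + 1 := by push_cast; ring
      simp only [maxD_eq] at ih ⊢
      rw [hx, PySem.List.pyRange_neg_one_cons (by omega : (-1 : Int) < (n : Int)),
        List.foldl_cons, List.foldl_cons, hcast]
      simp only []
      have hM : List.foldl max (-1) (PySem.List.slice row (some ((n : Int))) (some w))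
          = max (PySem.List.pyGetD row (n : Int) 0)
              (List.foldl max (-1) (PySem.List.slice row (some ((n : Int) + 1)) (some w))) := by
        rw [slice_cons row n w hnw hw, List.foldl_cons,
          show max (-1 : Int) (row.getD n 0) = max (row.getD n 0) (-1) from max_comm _ _,
          foldl_max_swap, PySem.List.pyGetD_natCast]
      by_cases hc : PySem.List.pyGetD row (n : Int) 0 >
          List.foldl max (-1) (PySem.List.slice row (some ((n : Int) + 1)) (some w))
      · simp only [hc, if_true]
        have hval : PySem.List.pyGetD row (n : Int) 0
            = List.foldl max (-1) (PySem.List.slice row (some ((n : Int))) (some w)) := by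
          rw [hM]; exact (max_eq_left (le_of_lt hc)).symm
        rw [hval]
        exact ih (by omega) _
      · simp only [hc, if_false]
        have hval : List.foldl max (-1) (PySem.List.slice row (some ((n : Int) + 1)) (some w))
            = List.foldl max (-1) (PySem.List.slice row (some ((n : Int))) (some w)) := by
          rw [hM]; exact (max_eq_right (not_lt.1 hc)).symm
        rw [hval]
        exact ih (by omega) vis

theorem headD_eq_pyGetD (grid : List (List Int)) :
    PySem.List.pyGetD grid 0 [] = grid.headD [] := by
  cases grid with
  | nil => simp [PySem.List.pyGetD, PySem.List.pyGet?, PySem.List.pyIdx?]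
  | cons a t => simp [PySem.List.pyGetD, PySem.List.pyGet?, PySem.List.pyIdx?]

-- ===== VERDICT (by name: the statement is the Claim_ definition above) =====
theorem is_visible_from_right_spec : Claim_equal_is_visible_from_right := by
  intro grid _ hpre
  unfold Spec_is_visible_from_right is_visible_from_right is_visible_from_right_alt
  apply Eq.symm
  apply PySem.List.foldl_congr_mem
  intro vis y hy
  obtain ⟨hy0, hylt⟩ := (PySem.List.mem_pyRange_one).1 hy
  simp only []
  set w : Int := ((PySem.List.pyGetD grid 0 []).length : Int) with hwdef
  set row := PySem.List.pyGetD grid y [] with hrow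
  have hmem : row ∈ grid := by
    rw [hrow, PySem.List.pyGetD_of_nonneg _ _ hy0]
    have hlt : y.toNat < grid.length := by omega
    rw [List.getD_eq_getElem _ _ hlt]
    exact List.getElem_mem hlt
  have hw : w ≤ (row.length : Int) := by
    have := hpre row hmem
    rw [hwdef, headD_eq_pyGetD]
    exact_mod_cast this
  have h0w : (0 : Int) ≤ w := by rw [hwdef]; exact Int.natCast_nonneg _
  have hcast : ((w.toNat : Nat) : Int) = w := by omega
  have init : (PySem.List.slice row (some ((w.toNat : Nat) : Int)) (some w)).foldl max (-1)
      = -1 := by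
    rw [hcast, PySem.List.slice_toNat _ h0w h0w]
    simp
  have key := rowEq row w y hw w.toNat (by omega) vis
  rw [init, hcast] at key
  exact key.symm
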